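-- pv_equiv track=rewrite | github.com/Geson-anko/JarvisEngine | JarvisEngine/core/name.py | count_head_sep
-- ===== SOURCE A (Python) =====
-- SEP = "."
--
-- def count_head_sep(name:str) -> int:
--     """count number of head separator of name.
--     Ex:
--         "..a.b" -> 2
--         "...c" -> 3
--     """
--     num = 0
--     for s in name:
--         if s != SEP:
--             return num
--         else:
--             num += 1
--     return num
-- ===== SOURCE B (Python) =====
-- SEP = "."
--
-- def count_head_sep(name: str) -> int:
--     return len(name) - len(name.lstrip(SEP))
-- ===== Notes on version B (the rewrite author's own statement) =====
-- stated objective: idiomatic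
-- what changed: Replaces the explicit counting loop with len(name) - len(name.lstrip('.')): the count is derived from the length difference after stripping leading separators, no counter or early return.
import Mathlib
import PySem

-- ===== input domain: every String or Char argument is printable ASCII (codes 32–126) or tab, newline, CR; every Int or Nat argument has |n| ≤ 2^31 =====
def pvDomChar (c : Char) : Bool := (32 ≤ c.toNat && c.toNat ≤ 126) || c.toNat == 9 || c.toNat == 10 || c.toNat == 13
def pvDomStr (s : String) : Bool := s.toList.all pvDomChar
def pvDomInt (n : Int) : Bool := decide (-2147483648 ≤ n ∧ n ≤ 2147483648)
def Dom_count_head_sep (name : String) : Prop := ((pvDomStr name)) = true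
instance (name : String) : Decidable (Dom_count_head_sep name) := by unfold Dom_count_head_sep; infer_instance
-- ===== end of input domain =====

-- B computes the count as len(name) - len(name.lstrip('.')) instead of A's explicit loop; idiomatic, same behaviour.

-- ===== PORT A =====
-- the 'for s in name' loop with early return, as structural recursion carrying the counter
def countHeadSepLoop (l : List Char) (num : Int) : Int :=
  match l with
  | [] => num
  | s :: rest => if s ≠ '.' then num else countHeadSepLoop rest (num + 1)

def count_head_sep (name : String) : Int := countHeadSepLoop name.toList 0

-- ===== PORT B =====
-- name.lstrip('.') ported by hand as dropWhile (· == '.'): exact, Python lstrip(chars)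
-- removes the maximal leading run of characters from the set {'.'}
def count_head_sep_alt (name : String) : Int :=
  (name.toList.length : Int) - ((name.toList.dropWhile (· == '.')).length : Int)

-- ===== PRECONDITION & SPEC =====
def Spec_count_head_sep (name : String) (out : Int) : Prop := out = count_head_sep_alt name
instance (name : String) (out : Int) : Decidable (Spec_count_head_sep name out) := by unfold Spec_count_head_sep; infer_instance

-- ===== CLAIM (what is proved, stated in full; the proofs are below) =====
def Claim_equal_count_head_sep : Prop := ∀ (name : String), Dom_count_head_sep name → Spec_count_head_sep name (count_head_sep name)

-- ===== LEMMAS AND PROOFS =====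
theorem countHeadSepLoop_eq (l : List Char) (num : Int) :
    countHeadSepLoop l num = num + ((l.takeWhile (· == '.')).length : Int) := by
  induction l generalizing num with
  | nil => simp [countHeadSepLoop]
  | cons c rest ih =>
    by_cases h : c = '.'
    · subst h
      simp [countHeadSepLoop, List.takeWhile, ih]
      ring
    · have hb : (c == '.') = false := by simp [h]
      simp [countHeadSepLoop, List.takeWhile, h, hb]

-- ===== VERDICT (by name: the statement is the Claim_ definition above) =====
theorem count_head_sep_spec : Claim_equal_count_head_sep := by
  intro name _
  unfold Spec_count_head_sep count_head_sep count_head_sep_alt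
  rw [countHeadSepLoop_eq]
  have h := List.takeWhile_append_dropWhile (p := (· == '.')) (l := name.toList)
  have hlen : (name.toList.takeWhile (· == '.')).length
      + (name.toList.dropWhile (· == '.')).length = name.toList.length := by
    rw [← List.length_append, h]
  omega
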